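-- pv_equiv track=rewrite | github.com/amirhmi/SourceChannelCoding | EncoderDecoder.py | convolutional_enccoder
-- ===== SOURCE A (Python) =====
-- def convolutional_enccoder(binary_text):
--     current_state = "00"
--     encoder_text = ""
--     for i in range(len(binary_text)):
--         if current_state == "00":
--             if binary_text[i] == "0":
--                 encoder_text += "00"
--                 current_state = "00"
--                 continue
--             elif binary_text[i] == "1":
--                 encoder_text += "11"
--                 current_state = "10"
--                 continue
--         elif current_state == "10":
--             if binary_text[i] == "0":
--                 encoder_text += "11"
--                 current_state = "01"
--                 continue
--             elif binary_text[i] == "1":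
--                 encoder_text += "00"
--                 current_state = "11"
--                 continue
--         elif current_state == "01":
--             if binary_text[i] == "0":
--                 encoder_text += "10"
--                 current_state = "00"
--                 continue
--             elif binary_text[i] == "1":
--                 encoder_text += "01"
--                 current_state = "10"
--                 continue
--         elif current_state == "11":
--             if binary_text[i] == "0":
--                 encoder_text += "01"
--                 current_state = "01"
--                 continue
--             elif binary_text[i] == "1":
--                 encoder_text += "10"
--                 current_state = "11"
--                 continue
--     return encoder_text
-- ===== SOURCE B (Python) =====
-- def convolutional_enccoder(binary_text):
--     s0 = 0
--     s1 = 0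
--     out = []
--     for ch in binary_text:
--         if ch == "0":
--             b = 0
--         elif ch == "1":
--             b = 1
--         else:
--             continue
--         out.append(str(b ^ s0 ^ s1))
--         out.append(str(b ^ s0))
--         s1 = s0
--         s0 = b
--     return "".join(out)
-- ===== Notes on version B (the rewrite author's own statement) =====
-- stated objective: simpler
-- what changed: Replaced the enumerated 4-state string transition table with a two-bit shift register computing each output pair via the XOR generator polynomials (b^s0^s1, b^s0), collecting pieces in a list joined once at the end.
import Mathlib
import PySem

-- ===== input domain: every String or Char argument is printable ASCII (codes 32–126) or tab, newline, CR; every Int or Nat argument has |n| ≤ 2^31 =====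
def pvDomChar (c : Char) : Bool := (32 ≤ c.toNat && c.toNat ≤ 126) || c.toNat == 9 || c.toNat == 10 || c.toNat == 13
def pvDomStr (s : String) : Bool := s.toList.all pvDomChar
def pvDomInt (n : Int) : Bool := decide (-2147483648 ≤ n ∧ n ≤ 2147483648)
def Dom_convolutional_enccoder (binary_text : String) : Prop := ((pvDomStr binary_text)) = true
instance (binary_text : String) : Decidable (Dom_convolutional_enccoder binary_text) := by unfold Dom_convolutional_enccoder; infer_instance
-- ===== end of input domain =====

-- B replaces A's enumerated 4-state transition table by a two-bit shift register whose
-- outputs are the XOR generator polynomials (b^s0^s1, b^s0).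

-- ===== PORT A =====
-- one iteration of A's loop: state = (current_state, encoder_text)
def pvStepA (st : String × String) (c : Char) : String × String :=
  let cs := st.1
  let acc := st.2
  if cs = "00" then
    if c = '0' then ("00", acc ++ "00")
    else if c = '1' then ("10", acc ++ "11")
    else (cs, acc)
  else if cs = "10" then
    if c = '0' then ("01", acc ++ "11")
    else if c = '1' then ("11", acc ++ "00")
    else (cs, acc)
  else if cs = "01" then
    if c = '0' then ("00", acc ++ "10")
    else if c = '1' then ("10", acc ++ "01")
    else (cs, acc)
  else if cs = "11" then
    if c = '0' then ("01", acc ++ "01")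
    else if c = '1' then ("11", acc ++ "10")
    else (cs, acc)
  else (cs, acc)

def convolutional_enccoder (binary_text : String) : String :=
  (binary_text.toList.foldl pvStepA ("00", "")).2

-- ===== PORT B =====
-- one processed bit: out.append(str(b^s0^s1)); out.append(str(b^s0)); s1, s0 = s0, b
def pvStepBit (st : Nat × Nat × List String) (b : Nat) : Nat × Nat × List String :=
  let s0 := st.1
  let s1 := st.2.1
  let out := st.2.2
  (b, s0, out ++ [PySem.Int.toStr (Int.ofNat (b ^^^ s0 ^^^ s1)), PySem.Int.toStr (Int.ofNat (b ^^^ s0))])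

def pvStepB (st : Nat × Nat × List String) (c : Char) : Nat × Nat × List String :=
  if c = '0' then pvStepBit st 0
  else if c = '1' then pvStepBit st 1
  else st

def convolutional_enccoder_alt (binary_text : String) : String :=
  String.join (binary_text.toList.foldl pvStepB (0, 0, [])).2.2

-- ===== PRECONDITION & SPEC =====
def Spec_convolutional_enccoder (binary_text : String) (out : String) : Prop := out = convolutional_enccoder_alt binary_text
instance (binary_text : String) (out : String) : Decidable (Spec_convolutional_enccoder binary_text out) := by unfold Spec_convolutional_enccoder; infer_instance

-- ===== CLAIM (what is proved, stated in full; the proofs are below) =====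
def Claim_equal_convolutional_enccoder : Prop := ∀ (binary_text : String), Dom_convolutional_enccoder binary_text → Spec_convolutional_enccoder binary_text (convolutional_enccoder binary_text)

-- ===== LEMMAS AND PROOFS =====

-- one B step only appends to the out component
lemma pvStepB_shift (s0 s1 : Nat) (out : List String) (c : Char) :
    pvStepB (s0, s1, out) c
      = ((pvStepB (s0, s1, ([] : List String)) c).1, (pvStepB (s0, s1, ([] : List String)) c).2.1,
         out ++ (pvStepB (s0, s1, ([] : List String)) c).2.2) := by
  by_cases h0 : c = '0'
  · simp [pvStepB, pvStepBit, h0]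
  · by_cases h1 : c = '1' <;> simp [pvStepB, pvStepBit, h0, h1]

-- B's out-list is accumulated by appending on the right
lemma pvStepB_out (l : List Char) : ∀ (s0 s1 : Nat) (out : List String),
    (l.foldl pvStepB (s0, s1, out)).2.2 = out ++ (l.foldl pvStepB (s0, s1, [])).2.2 := by
  induction l with
  | nil => intro s0 s1 out; simp
  | cons c l ih =>
    intro s0 s1 out
    rw [List.foldl_cons, List.foldl_cons, pvStepB_shift s0 s1 out c, pvStepB_shift s0 s1 [] c]
    simp only [List.nil_append]
    rw [ih ((pvStepB (s0, s1, ([] : List String)) c).1)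
          ((pvStepB (s0, s1, ([] : List String)) c).2.1)
          (out ++ (pvStepB (s0, s1, ([] : List String)) c).2.2),
        ih ((pvStepB (s0, s1, ([] : List String)) c).1)
          ((pvStepB (s0, s1, ([] : List String)) c).2.1)
          ((pvStepB (s0, s1, ([] : List String)) c).2.2)]
    rw [List.append_assoc]

-- the two register bits encoded as A's state string
def pvSt (s0 s1 : Bool) : String :=
  match s0, s1 with
  | false, false => "00"
  | true,  false => "10"
  | false, true  => "01"
  | true,  true  => "11"

def pvN (b : Bool) : Nat := if b then 1 else 0

lemma pvJoin2 (a b : String) (l : List String) :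
    String.join (a :: b :: l) = (a ++ b) ++ String.join l := by
  simp [String.join_eq, String.append_assoc]

lemma pv_main (l : List Char) : ∀ (s0 s1 : Bool) (acc : String),
    (l.foldl pvStepA (pvSt s0 s1, acc)).2
      = acc ++ String.join (l.foldl pvStepB (pvN s0, pvN s1, [])).2.2 := by
  induction l with
  | nil => intro s0 s1 acc; simp [String.join]
  | cons c l ih =>
    intro s0 s1 acc
    by_cases h0 : c = '0'
    · subst h0
      simp only [List.foldl_cons]
      cases s0 <;> cases s1
      · rw [show pvStepA (pvSt false false, acc) '0' = (pvSt false false, acc ++ "00") from by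
            simp [pvStepA, pvSt]]
        rw [show pvStepB (pvN false, pvN false, ([] : List String)) '0'
              = (pvN false, pvN false, ["0", "0"]) from by decide]
        rw [pvStepB_out l (pvN false) (pvN false) ["0", "0"]]
        simp only [List.cons_append, List.nil_append]
        rw [pvJoin2, show ("0" : String) ++ "0" = "00" from by decide]
        rw [ih false false, String.append_assoc]
      · rw [show pvStepA (pvSt false true, acc) '0' = (pvSt false false, acc ++ "10") from by
            simp [pvStepA, pvSt]]
        rw [show pvStepB (pvN false, pvN true, ([] : List String)) '0'
              = (pvN false, pvN false, ["1", "0"]) from by decide]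
        rw [pvStepB_out l (pvN false) (pvN false) ["1", "0"]]
        simp only [List.cons_append, List.nil_append]
        rw [pvJoin2, show ("1" : String) ++ "0" = "10" from by decide]
        rw [ih false false, String.append_assoc]
      · rw [show pvStepA (pvSt true false, acc) '0' = (pvSt false true, acc ++ "11") from by
            simp [pvStepA, pvSt]]
        rw [show pvStepB (pvN true, pvN false, ([] : List String)) '0'
              = (pvN false, pvN true, ["1", "1"]) from by decide]
        rw [pvStepB_out l (pvN false) (pvN true) ["1", "1"]]
        simp only [List.cons_append, List.nil_append]
        rw [pvJoin2, show ("1" : String) ++ "1" = "11" from by decide]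
        rw [ih false true, String.append_assoc]
      · rw [show pvStepA (pvSt true true, acc) '0' = (pvSt false true, acc ++ "01") from by
            simp [pvStepA, pvSt]]
        rw [show pvStepB (pvN true, pvN true, ([] : List String)) '0'
              = (pvN false, pvN true, ["0", "1"]) from by decide]
        rw [pvStepB_out l (pvN false) (pvN true) ["0", "1"]]
        simp only [List.cons_append, List.nil_append]
        rw [pvJoin2, show ("0" : String) ++ "1" = "01" from by decide]
        rw [ih false true, String.append_assoc]
    · by_cases h1 : c = '1'
      · subst h1
        simp only [List.foldl_cons]
        cases s0 <;> cases s1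
        · rw [show pvStepA (pvSt false false, acc) '1' = (pvSt true false, acc ++ "11") from by
              simp [pvStepA, pvSt]]
          rw [show pvStepB (pvN false, pvN false, ([] : List String)) '1'
                = (pvN true, pvN false, ["1", "1"]) from by decide]
          rw [pvStepB_out l (pvN true) (pvN false) ["1", "1"]]
          simp only [List.cons_append, List.nil_append]
          rw [pvJoin2, show ("1" : String) ++ "1" = "11" from by decide]
          rw [ih true false, String.append_assoc]
        · rw [show pvStepA (pvSt false true, acc) '1' = (pvSt true false, acc ++ "01") from by
              simp [pvStepA, pvSt]]
          rw [show pvStepB (pvN false, pvN true, ([] : List String)) '1'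
                = (pvN true, pvN false, ["0", "1"]) from by decide]
          rw [pvStepB_out l (pvN true) (pvN false) ["0", "1"]]
          simp only [List.cons_append, List.nil_append]
          rw [pvJoin2, show ("0" : String) ++ "1" = "01" from by decide]
          rw [ih true false, String.append_assoc]
        · rw [show pvStepA (pvSt true false, acc) '1' = (pvSt true true, acc ++ "00") from by
              simp [pvStepA, pvSt]]
          rw [show pvStepB (pvN true, pvN false, ([] : List String)) '1'
                = (pvN true, pvN true, ["0", "0"]) from by decide]
          rw [pvStepB_out l (pvN true) (pvN true) ["0", "0"]]
          simp only [List.cons_append, List.nil_append]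
          rw [pvJoin2, show ("0" : String) ++ "0" = "00" from by decide]
          rw [ih true true, String.append_assoc]
        · rw [show pvStepA (pvSt true true, acc) '1' = (pvSt true true, acc ++ "10") from by
              simp [pvStepA, pvSt]]
          rw [show pvStepB (pvN true, pvN true, ([] : List String)) '1'
                = (pvN true, pvN true, ["1", "0"]) from by decide]
          rw [pvStepB_out l (pvN true) (pvN true) ["1", "0"]]
          simp only [List.cons_append, List.nil_append]
          rw [pvJoin2, show ("1" : String) ++ "0" = "10" from by decide]
          rw [ih true true, String.append_assoc]
      · simp only [List.foldl_cons]
        have hA : pvStepA (pvSt s0 s1, acc) c = (pvSt s0 s1, acc) := by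
          cases s0 <;> cases s1 <;> simp [pvStepA, pvSt, h0, h1]
        have hB : pvStepB (pvN s0, pvN s1, ([] : List String)) c = (pvN s0, pvN s1, []) := by
          simp [pvStepB, h0, h1]
        rw [hA, hB, ih]

-- ===== VERDICT (by name: the statement is the Claim_ definition above) =====
theorem convolutional_enccoder_spec : Claim_equal_convolutional_enccoder := by
  intro s _
  unfold Spec_convolutional_enccoder convolutional_enccoder convolutional_enccoder_alt
  have h := pv_main s.toList false false ""
  simpa [pvSt, pvN] using h
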